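-- pv_equiv track=rewrite | github.com/matheuscordeiro/Codility | Lessons/Prime and composite numbers/CountFactors/Flags/solution.py | create_next_peak
-- ===== SOURCE A (Python) =====
-- def create_peaks(A):
--     peaks = [False] * len(A)
--     for i in range(1, len(A)-1):
--         if A[i-1] < A[i] > A[i+1]:
--             peaks[i] = True
--
--     return peaks
--
-- def create_next_peak(A):
--     peaks = create_peaks(A)
--     next_peaks = [-1] * len(peaks)
--     for i in range(len(peaks)-2, -1, -1):
--         if peaks[i]:
--             next_peaks[i] = i
--         else:
--             next_peaks[i] = next_peaks[i+1]
--
--     return next_peaks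
-- ===== SOURCE B (Python) =====
-- def create_next_peak(A):
--     n = len(A)
--     pk = [i for i in range(1, n - 1) if A[i - 1] < A[i] > A[i + 1]]
--     res = []
--     for i in range(n):
--         while pk and pk[0] < i:
--             pk.pop(0)
--         res.append(pk[0] if pk else -1)
--     return res
-- ===== Notes on version B (the rewrite author's own statement) =====
-- stated objective: alternative
-- what changed: Instead of a dense boolean peak array plus a backward suffix-propagation pass, B builds the sparse list of peak indices once and does a single forward sweep consuming that queue, emitting the front peak index (or -1 once exhausted).
import Mathlib
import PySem

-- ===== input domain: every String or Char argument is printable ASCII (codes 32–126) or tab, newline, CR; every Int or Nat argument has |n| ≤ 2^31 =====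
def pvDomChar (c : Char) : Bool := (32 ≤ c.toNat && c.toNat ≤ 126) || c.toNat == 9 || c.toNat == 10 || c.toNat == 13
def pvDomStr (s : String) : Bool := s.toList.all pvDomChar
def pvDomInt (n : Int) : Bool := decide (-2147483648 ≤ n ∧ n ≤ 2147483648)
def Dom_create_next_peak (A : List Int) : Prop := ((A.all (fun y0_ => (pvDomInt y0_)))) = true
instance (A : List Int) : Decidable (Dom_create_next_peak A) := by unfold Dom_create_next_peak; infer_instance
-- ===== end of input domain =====

-- B: builds the sparse list of peak indices once and sweeps forward consuming it, instead of A's dense boolean array plus a backward propagation pass (alternative decomposition).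

-- the peak test A[i-1] < A[i] > A[i+1] (both Pythons write this same expression)
def pvCond (A : List Int) (i : Int) : Bool :=
  decide (PySem.List.pyGetD A (i-1) 0 < PySem.List.pyGetD A i 0 ∧
          PySem.List.pyGetD A i 0 > PySem.List.pyGetD A (i+1) 0)

-- ===== PORT A =====
def create_peaks (A : List Int) : List Bool :=
  -- peaks = [False]*len(A); for i in range(1, len(A)-1): if A[i-1] < A[i] > A[i+1]: peaks[i] = True
  -- loop indices satisfy 1 ≤ i, so i.toNat is exact here
  (PySem.List.pyRange 1 ((A.length : Int) - 1) 1).foldl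
    (fun pk i => if pvCond A i then pk.set i.toNat true else pk)
    (List.replicate A.length false)

def create_next_peak (A : List Int) : List Int :=
  let peaks := create_peaks A
  -- next_peaks = [-1]*len(peaks); for i in range(len(peaks)-2, -1, -1): …
  (PySem.List.pyRange ((peaks.length : Int) - 2) (-1) (-1)).foldl
    (fun np i =>
      if PySem.List.pyGetD peaks i false then np.set i.toNat i
      else np.set i.toNat (PySem.List.pyGetD np (i+1) (-1)))
    (List.replicate peaks.length (-1))

-- ===== PORT B =====
-- body of B's for-loop: the while-loop drops consumed peaks from the front, then the front (or -1) is appended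
def bStep (st : List Int × List Int) (i : Int) : List Int × List Int :=
  let rem := st.1.dropWhile (fun x => decide (x < i))
  (rem, st.2 ++ [match rem with | [] => -1 | x :: _ => x])

def create_next_peak_alt (A : List Int) : List Int :=
  let n : Int := (A.length : Int)
  -- pk = [i for i in range(1, n-1) if A[i-1] < A[i] > A[i+1]]
  let pk := (PySem.List.pyRange 1 (n - 1) 1).filter (fun i => pvCond A i)
  ((PySem.List.pyRange 0 n 1).foldl bStep (pk, [])).2

-- ===== PRECONDITION & SPEC =====
def Spec_create_next_peak (A : List Int) (out : List Int) : Prop := out = create_next_peak_alt A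
instance (A : List Int) (out : List Int) : Decidable (Spec_create_next_peak A out) := by unfold Spec_create_next_peak; infer_instance

-- ===== CLAIM (what is proved, stated in full; the proofs are below) =====
def Claim_equal_create_next_peak : Prop := ∀ (A : List Int), Dom_create_next_peak A → Spec_create_next_peak A (create_next_peak A)

-- ===== LEMMAS AND PROOFS =====

-- peaks[i] as a function of the index
def peakB (A : List Int) (i : Nat) : Bool :=
  decide (1 ≤ i) && decide (i + 1 < A.length) && pvCond A i

-- the common specification: index of the nearest peak at position ≥ i, else -1
def npSpec (A : List Int) (i : Nat) : Int :=
  if _h : i + 1 < A.length then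
    (if peakB A i then (i : Int) else npSpec A (i+1))
  else -1
termination_by A.length - i

-- B's peak-index list
def pkOf (A : List Int) : List Int :=
  (PySem.List.pyRange 1 ((A.length : Int) - 1) 1).filter (fun i => pvCond A i)

-- front of the unconsumed queue (or -1)
def hOf (pk : List Int) (i : Int) : Int :=
  match pk.dropWhile (fun x => decide (x < i)) with | [] => -1 | x :: _ => x

theorem repl_eq_map {n : Nat} (f : Nat → Bool) (h : ∀ j, j < n → f j = false) :
    List.replicate n false = (List.range n).map f := by
  apply List.ext_getElem <;> simp
  intro j hj; exact h j hj

theorem replI_eq_map {n : Nat} (f : Nat → Int) (h : ∀ j, j < n → f j = -1) :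
    List.replicate n (-1 : Int) = (List.range n).map f := by
  apply List.ext_getElem <;> simp
  intro j hj; exact (h j hj).symm

theorem npSpec_last (A : List Int) (i : Nat) (h : ¬ (i + 1 < A.length)) :
    npSpec A i = -1 := by
  unfold npSpec; simp [h]

-- A-side invariant for the first loop
theorem peaks_inv (A : List Int) : ∀ (m : Nat), 1 ≤ m → m ≤ A.length - 1 →
    (PySem.List.pyRange 1 (m : Int) 1).foldl
      (fun pk i => if pvCond A i then pk.set i.toNat true else pk)
      (List.replicate A.length false)
    = (List.range A.length).map (fun j => peakB A j && decide (j < m)) := by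
  intro m hm
  induction m, hm using Nat.le_induction with
  | base =>
      intro _
      rw [show ((1:Nat):Int) = 1 by norm_num, PySem.List.pyRange_one_eq_nil le_rfl, List.foldl_nil]
      apply repl_eq_map
      intro j _
      cases j with
      | zero => simp [peakB]
      | succ jj => simp
  | succ m hm1 ih =>
      intro hle
      rw [show ((m+1:Nat):Int) = (m:Int) + 1 by push_cast; ring,
          PySem.List.pyRange_one_succ_right (by exact_mod_cast hm1),
          List.foldl_append, ih (by omega), List.foldl_cons, List.foldl_nil]
      cases hc : pvCond A (m : Int) with
      | false =>
          rw [if_neg (by simp [hc])]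
          apply List.map_congr_left
          intro j _
          by_cases hjm : j = m
          · subst hjm
            unfold peakB
            simp [hc]
          · have : decide (j < m) = decide (j < m + 1) := by
              simp only [decide_eq_decide]; omega
            rw [this]
      | true =>
          rw [if_pos (by simp [hc])]
          apply List.ext_getElem
          · simp
          · intro j hj1 hj2
            simp only [List.length_set, List.length_map, List.length_range] at hj1
            simp only [Int.toNat_natCast, List.getElem_set, List.getElem_map,
              List.getElem_range]
            by_cases hjm : m = j
            · subst hjm
              rw [if_pos rfl]
              symm
              have hlen : m + 1 < A.length := by omega
              unfold peakB
              simp [hm1, hlen, hc]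
            · rw [if_neg hjm]
              have : decide (j < m) = decide (j < m + 1) := by
                simp only [decide_eq_decide]; omega
              rw [this]

-- A-side: the boolean array equals (range n).map (peakB A)
theorem create_peaks_eq (A : List Int) :
    create_peaks A = (List.range A.length).map (peakB A) := by
  unfold create_peaks
  by_cases hn : A.length ≤ 1
  · rw [PySem.List.pyRange_one_eq_nil (by omega), List.foldl_nil]
    apply repl_eq_map
    intro j hj
    unfold peakB
    have : ¬ (j + 1 < A.length) := by omega
    simp [this]
  · have h1 : ((A.length : Int) - 1) = ((A.length - 1 : Nat) : Int) := by
      push_cast [Nat.cast_sub (by omega : 1 ≤ A.length)]; ring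
    rw [h1, peaks_inv A (A.length - 1) (by omega) le_rfl]
    apply List.map_congr_left
    intro j _
    by_cases hp : peakB A j = true
    · have : j + 1 < A.length := by
        unfold peakB at hp
        simp only [Bool.and_eq_true, decide_eq_true_eq] at hp
        exact hp.1.2
      have hlt : j < A.length - 1 := by omega
      simp [hp, hlt]
    · have hf : peakB A j = false := Bool.eq_false_iff.mpr hp
      simp [hf]

-- A-side invariant for the backward loop
theorem down_inv (A : List Int) : ∀ (k : Nat), k ≤ A.length →
    (PySem.List.pyRange ((k : Int) - 1) (-1) (-1)).foldl
      (fun np i =>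
        if PySem.List.pyGetD ((List.range A.length).map (peakB A)) i false then np.set i.toNat i
        else np.set i.toNat (PySem.List.pyGetD np (i+1) (-1)))
      ((List.range A.length).map (fun (j : Nat) => if (k : Int) - 1 < (j : Int) then npSpec A j else -1))
    = (List.range A.length).map (npSpec A) := by
  intro k
  induction k with
  | zero =>
      intro _
      rw [show ((0:Nat):Int) - 1 = -1 by norm_num,
          PySem.List.pyRange_neg_one_eq_nil le_rfl, List.foldl_nil]
      apply List.map_congr_left
      intro j _
      have : (-1 : Int) < (j : Int) := by omega
      simp [this]
  | succ k ih =>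
      intro hk
      rw [show ((k+1:Nat):Int) - 1 = (k:Int) by push_cast; ring,
          PySem.List.pyRange_neg_one_cons (by omega), List.foldl_cons]
      have hklt : k < A.length := by omega
      have hpg : PySem.List.pyGetD ((List.range A.length).map (peakB A)) ((k:Nat):Int) false
          = peakB A k := by
        rw [PySem.List.pyGetD_natCast]
        simp [List.getD_eq_getElem?_getD, hklt]
      have hstep :
          (if PySem.List.pyGetD ((List.range A.length).map (peakB A)) ((k:Nat):Int) false = true then
            ((List.range A.length).map (fun (j : Nat) => if (k : Int) < (j : Int) then npSpec A j else -1)).set ((k:Nat):Int).toNat ((k:Nat):Int)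
          else
            ((List.range A.length).map (fun (j : Nat) => if (k : Int) < (j : Int) then npSpec A j else -1)).set ((k:Nat):Int).toNat
              (PySem.List.pyGetD ((List.range A.length).map (fun (j : Nat) => if (k : Int) < (j : Int) then npSpec A j else -1)) (((k:Nat):Int)+1) (-1)))
          = ((List.range A.length).map (fun (j : Nat) => if (k : Int) < (j : Int) then npSpec A j else -1)).set k (npSpec A k) := by
        simp only [hpg, Int.toNat_natCast]
        by_cases hp : peakB A k = true
        · rw [if_pos hp]
          have hlt : k + 1 < A.length := by
            unfold peakB at hp
            simp only [Bool.and_eq_true, decide_eq_true_eq] at hp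
            exact hp.1.2
          have : npSpec A k = (k : Int) := by
            rw [npSpec]
            simp [hlt, hp]
          rw [this]
        · rw [if_neg (by simp [hp])]
          congr 1
          by_cases hlt : k + 1 < A.length
          · rw [show ((k:Nat):Int) + 1 = ((k+1:Nat):Int) by push_cast; ring,
                PySem.List.pyGetD_natCast]
            have hc : ((k:Int) < ((k+1:Nat):Int)) := by push_cast; omega
            simp only [List.getD_eq_getElem?_getD, List.getElem?_map, List.getElem?_range, hlt]
            have : npSpec A k = npSpec A (k+1) := by
              rw [npSpec]
              simp [hlt, hp]
            simp [hc, this]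
          · have hlen : k + 1 = A.length := by omega
            rw [show ((k:Nat):Int) + 1 = ((k+1:Nat):Int) by push_cast; ring,
                PySem.List.pyGetD_natCast]
            rw [List.getD_eq_default _ _ (by simp [hlen])]
            rw [npSpec_last A k (by omega)]
      rw [hstep]
      have hset :
          ((List.range A.length).map (fun (j : Nat) => if (k : Int) < (j : Int) then npSpec A j else -1)).set
              k (npSpec A k)
          = (List.range A.length).map (fun (j : Nat) => if (k : Int) - 1 < (j : Int) then npSpec A j else -1) := by
        apply List.ext_getElem
        · simp
        · intro j hj1 hj2
          simp only [List.length_set, List.length_map, List.length_range] at hj1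
          simp only [List.getElem_set, List.getElem_map, List.getElem_range]
          by_cases hjm : k = j
          · subst hjm
            have : (k : Int) - 1 < (k : Int) := by omega
            simp [this]
          · rw [if_neg hjm]
            have : ((k:Int) < (j:Int)) ↔ ((k:Int) - 1 < (j:Int)) := by omega
            simp only [this]
      rw [hset]
      exact ih (by omega)

theorem create_next_peak_eq (A : List Int) :
    create_next_peak A = (List.range A.length).map (npSpec A) := by
  unfold create_next_peak
  show (PySem.List.pyRange (((create_peaks A).length : Int) - 2) (-1) (-1)).foldl
      (fun np i =>
        if PySem.List.pyGetD (create_peaks A) i false then np.set i.toNat i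
        else np.set i.toNat (PySem.List.pyGetD np (i+1) (-1)))
      (List.replicate (create_peaks A).length (-1))
    = (List.range A.length).map (npSpec A)
  rw [create_peaks_eq]
  have hlen : ((List.range A.length).map (peakB A)).length = A.length := by simp
  rw [hlen]
  by_cases hn : A.length = 0
  · rw [hn]
    rw [show ((0:Nat):Int) - 2 = -2 by norm_num,
        PySem.List.pyRange_neg_one_eq_nil (by norm_num)]
    simp
  · have h2 : (A.length : Int) - 2 = ((A.length - 1 : Nat) : Int) - 1 := by
      push_cast [Nat.cast_sub (by omega : 1 ≤ A.length)]; ring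
    rw [h2]
    have hinit : List.replicate A.length (-1 : Int)
        = (List.range A.length).map
            (fun (j : Nat) => if ((A.length - 1 : Nat) : Int) - 1 < (j : Int) then npSpec A j else -1) := by
      apply replI_eq_map
      intro j hj
      by_cases hc : ((A.length - 1 : Nat) : Int) - 1 < (j : Int)
      · rw [if_pos hc]
        apply npSpec_last
        omega
      · rw [if_neg hc]
    rw [hinit]
    exact down_inv A (A.length - 1) (by omega)

-- dropWhile by a weaker predicate after a stronger one
theorem dropWhile_dropWhile_of_imp {l : List Int} {p q : Int → Bool}
    (h : ∀ x, p x = true → q x = true) :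
    List.dropWhile q (List.dropWhile p l) = List.dropWhile q l := by
  induction l with
  | nil => rfl
  | cons x xs ih =>
      by_cases hp : p x = true
      · simp [List.dropWhile_cons, hp, h x hp, ih]
      · simp [List.dropWhile_cons, hp]

theorem dropWhile_congr_mem {l : List Int} {p q : Int → Bool}
    (h : ∀ x ∈ l, p x = q x) :
    List.dropWhile p l = List.dropWhile q l := by
  induction l with
  | nil => rfl
  | cons x xs ih =>
      have hx := h x (by simp)
      by_cases hp : p x = true
      · simp [List.dropWhile_cons, hp, hx ▸ hp, ih fun y hy => h y (by simp [hy])]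
      · simp [List.dropWhile_cons, hp, hx ▸ hp]

theorem dropWhile_eq_self_of_all {l : List Int} {p : Int → Bool}
    (h : ∀ x ∈ l, p x = false) :
    List.dropWhile p l = l := by
  cases l with
  | nil => rfl
  | cons x xs => simp [List.dropWhile_cons, h x (by simp)]

theorem dropWhile_lt_of_pairwise_mem {l : List Int} {a : Int}
    (hs : l.Pairwise (· < ·)) (ha : a ∈ l) :
    ∃ t, List.dropWhile (fun x => decide (x < a)) l = a :: t := by
  induction l with
  | nil => simp at ha
  | cons x xs ih =>
      rcases List.mem_cons.mp ha with rfl | hmem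
      · exact ⟨xs, by simp [List.dropWhile_cons]⟩
      · have hlt : x < a := (List.pairwise_cons.mp hs).1 a hmem
        have := ih (List.pairwise_cons.mp hs).2 hmem
        simpa [List.dropWhile_cons, hlt] using this

-- membership in B's queue
theorem mem_pkOf (A : List Int) (x : Int) :
    x ∈ pkOf A ↔ (1 ≤ x ∧ x < (A.length : Int) - 1 ∧ pvCond A x = true) := by
  unfold pkOf
  simp [List.mem_filter, PySem.List.mem_pyRange_one, and_assoc]

theorem pairwise_pkOf (A : List Int) : (pkOf A).Pairwise (· < ·) := by
  unfold pkOf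
  exact List.Pairwise.filter _ (PySem.List.pairwise_lt_pyRange_one 1 _)

-- the queue front equals the spec
theorem hOf_eq (A : List Int) : ∀ (d i : Nat), A.length - i ≤ d →
    hOf (pkOf A) (i : Int) = npSpec A i := by
  intro d
  induction d with
  | zero =>
      intro i hi
      have hnil : (pkOf A).dropWhile (fun x => decide (x < (i : Int))) = [] := by
        rw [List.dropWhile_eq_nil_iff]
        intro x hx
        have hm := (mem_pkOf A x).mp hx
        simp only [decide_eq_true_eq]
        omega
      rw [npSpec_last A i (by omega)]
      unfold hOf
      rw [hnil]
  | succ d ih =>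
      intro i hi
      by_cases h1 : i + 1 < A.length
      · by_cases h2 : peakB A i = true
        · have h2' := h2
          unfold peakB at h2'
          simp only [Bool.and_eq_true, decide_eq_true_eq] at h2'
          have hmem : (i : Int) ∈ pkOf A := by
            rw [mem_pkOf]
            exact ⟨by omega, by omega, h2'.2⟩
          obtain ⟨t, ht⟩ := dropWhile_lt_of_pairwise_mem (pairwise_pkOf A) hmem
          unfold hOf
          rw [ht]
          conv_rhs => rw [npSpec]
          simp [h1, h2]
        · have hnotmem : (i : Int) ∉ pkOf A := by
            intro hm
            rw [mem_pkOf] at hm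
            apply h2
            unfold peakB
            simp only [Bool.and_eq_true, decide_eq_true_eq]
            exact ⟨⟨by omega, h1⟩, hm.2.2⟩
          have hdw : (pkOf A).dropWhile (fun x => decide (x < (i : Int)))
              = (pkOf A).dropWhile (fun x => decide (x < ((i+1 : Nat) : Int))) := by
            apply dropWhile_congr_mem
            intro x hx
            have hne : x ≠ (i : Int) := fun he => hnotmem (he ▸ hx)
            simp only [decide_eq_decide]
            push_cast
            omega
          have hnp : npSpec A i = npSpec A (i+1) := by
            conv_lhs => rw [npSpec]
            simp [h1, h2]
          rw [hnp, ← ih (i+1) (by omega)]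
          unfold hOf
          rw [hdw]
      · have hnil : (pkOf A).dropWhile (fun x => decide (x < (i : Int))) = [] := by
          rw [List.dropWhile_eq_nil_iff]
          intro x hx
          have hm := (mem_pkOf A x).mp hx
          simp only [decide_eq_true_eq]
          omega
        rw [npSpec_last A i (by omega)]
        unfold hOf
        rw [hnil]

-- B's fold invariant
theorem b_fold (pk : List Int) : ∀ (k : Nat) (a c : Int) (acc : List Int), c ≤ a →
    ((PySem.List.pyRange a (a + (k : Int)) 1).foldl bStep
      (pk.dropWhile (fun x => decide (x < c)), acc)).2
    = acc ++ (List.range k).map (fun (t : Nat) => hOf pk (a + (t : Int))) := by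
  intro k
  induction k with
  | zero =>
      intro a c acc _
      rw [show a + ((0 : Nat) : Int) = a by simp, PySem.List.pyRange_one_eq_nil le_rfl]
      simp
  | succ k ih =>
      intro a c acc hca
      rw [show a + ((k+1 : Nat) : Int) = (a + 1) + (k : Int) by push_cast; ring,
          PySem.List.pyRange_one_cons (by push_cast; omega)]
      rw [List.foldl_cons]
      have hstep : bStep (pk.dropWhile (fun x => decide (x < c)), acc) a
          = (pk.dropWhile (fun x => decide (x < a)), acc ++ [hOf pk a]) := by
        unfold bStep hOf
        rw [dropWhile_dropWhile_of_imp (p := fun x => decide (x < c))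
            (q := fun x => decide (x < a)) (by intro x hx; simp at hx ⊢; omega)]
      rw [hstep, ih (a + 1) a (acc ++ [hOf pk a]) (by omega)]
      rw [List.range_succ_eq_map, List.map_cons, List.map_map, List.append_assoc]
      simp only [Function.comp_def]
      congr 1
      rw [List.singleton_append]
      congr 1
      · norm_num
      · apply List.map_congr_left
        intro t _
        congr 1
        push_cast; ring

theorem create_next_peak_alt_eq (A : List Int) :
    create_next_peak_alt A = (List.range A.length).map (npSpec A) := by
  unfold create_next_peak_alt
  show ((PySem.List.pyRange 0 (A.length : Int) 1).foldl bStep (pkOf A, [])).2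
      = (List.range A.length).map (npSpec A)
  have h0 : pkOf A = (pkOf A).dropWhile (fun x => decide (x < (0:Int))) := by
    refine (dropWhile_eq_self_of_all ?_).symm
    intro x hx
    have := (mem_pkOf A x).mp hx
    simp only [decide_eq_false_iff_not, not_lt]
    omega
  rw [h0, show ((A.length : Int)) = 0 + ((A.length : Nat) : Int) by ring,
      b_fold (pkOf A) A.length 0 0 [] le_rfl, List.nil_append]
  apply List.map_congr_left
  intro t _
  rw [show (0:Int) + (t:Int) = (t:Int) by ring]
  exact hOf_eq A A.length t (by omega)

-- ===== VERDICT (by name: the statement is the Claim_ definition above) =====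
theorem create_next_peak_spec : Claim_equal_create_next_peak := by
  intro A _
  unfold Spec_create_next_peak
  rw [create_next_peak_eq, create_next_peak_alt_eq]
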